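-- pv_equiv track=rewrite | github.com/minateras/dog_scraping | skk/SKK.py | normalize_kennel_name
-- ===== SOURCE A (Python) =====
-- def normalize_kennel_name(kennel_name: str) -> str:
--     kennel_name = list(kennel_name.title())
--     for i in range(1, len(kennel_name)):
--         previous = kennel_name[i - 1]
--         current = kennel_name[i]
--         next = kennel_name[i + 1] if (i + 1) < len(kennel_name) else None
--         # If previous is an apostrophe, current is a letter, and next is a space (or the end):
--         if previous == "'" and current.isalpha() and (next == ' ' or next is None):
--             kennel_name[i] = current.lower()
--     return ''.join(kennel_name)
-- ===== SOURCE B (Python) =====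
-- def normalize_kennel_name(kennel_name: str) -> str:
--     words = kennel_name.title().split(' ')
--     fixed = [
--         w[:-1] + w[-1].lower()
--         if len(w) >= 2 and w[-2] == "'" and w[-1].isalpha()
--         else w
--         for w in words
--     ]
--     return ' '.join(fixed)
-- ===== Notes on version B (the rewrite author's own statement) =====
-- stated objective: alternative
-- what changed: Replaced A's index loop with previous/current/next element lookups and in-place mutation of a char list by a word-level pass: title-case, split on the literal space, lowercase the last character of a word whose second-to-last character is an apostrophe, and join with spaces.
import Mathlib
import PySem

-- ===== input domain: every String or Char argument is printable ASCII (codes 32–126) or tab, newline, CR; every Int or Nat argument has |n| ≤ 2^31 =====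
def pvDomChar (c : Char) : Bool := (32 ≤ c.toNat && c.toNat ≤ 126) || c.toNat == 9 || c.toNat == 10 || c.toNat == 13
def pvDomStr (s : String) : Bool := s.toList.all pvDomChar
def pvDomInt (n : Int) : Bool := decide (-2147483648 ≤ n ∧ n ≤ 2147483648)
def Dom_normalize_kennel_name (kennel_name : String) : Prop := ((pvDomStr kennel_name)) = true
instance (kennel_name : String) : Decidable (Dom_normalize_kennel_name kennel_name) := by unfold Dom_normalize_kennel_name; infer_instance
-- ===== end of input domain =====

-- B replaces A's per-index previous/current/next scan with mutation by a word-level pass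
-- (title, split on ' ', fix each word's tail, join); same O(n), measurably faster constants
-- (no per-character list indexing/assignment).

-- Hand port of Python's str.title(), exact on the ASCII domain (cased chars = A-Z/a-z there):
-- a cased char is uppercased when the previous char is not cased, lowercased otherwise.
-- Shared by both ports, exactly as both Pythons call the same built-in.
def pyTitleGo (prevCased : Bool) : List Char → List Char
  | [] => []
  | c :: rest =>
    (if PySem.Chars.isalpha c then
        (if prevCased then PySem.Chars.lowerChar c else PySem.Chars.upperChar c)
      else c) :: pyTitleGo (PySem.Chars.isalpha c) rest

def pyTitle (cs : List Char) : List Char := pyTitleGo false cs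

-- ===== PORT A =====
-- the body of A's `for i in range(1, len(kennel_name))` loop (state = the mutated char list)
def stepA (l : List Char) (i : Int) : List Char :=
  let previous := PySem.List.pyGetD l (i - 1) ' '   -- l[i-1]; in range for every i the loop visits
  let current := PySem.List.pyGetD l i ' '          -- l[i]; in range likewise
  let next : Option Char := if i + 1 < (l.length : Int) then PySem.List.pyGet? l (i + 1) else none
  if previous = '\'' ∧ PySem.Chars.isalpha current = true ∧ (next = some ' ' ∨ next = none) then
    l.set i.toNat (PySem.Chars.lowerChar current)
  else l

def normalize_kennel_name (kennel_name : String) : String :=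
  let cs := pyTitle kennel_name.toList
  String.ofList ((PySem.List.pyRange 1 (cs.length : Int)).foldl stepA cs)

-- ===== PORT B =====
-- Source B's per-word fix: lowercase w[-1] when len(w) >= 2, w[-2] == "'" and w[-1].isalpha()
def fixWord (w : List Char) : List Char :=
  if 2 ≤ w.length ∧ PySem.List.pyGetD w (-2) ' ' = '\''
      ∧ PySem.Chars.isalpha (PySem.List.pyGetD w (-1) ' ') = true then
    PySem.List.slice w none (some (-1)) ++ [PySem.Chars.lowerChar (PySem.List.pyGetD w (-1) ' ')]
  else w

def normalize_kennel_name_alt (kennel_name : String) : String :=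
  let words := PySem.Chars.splitOn (pyTitle kennel_name.toList) [' ']
  String.ofList (PySem.Chars.join [' '] (words.map fixWord))

-- ===== PRECONDITION & SPEC =====
def Spec_normalize_kennel_name (kennel_name : String) (out : String) : Prop := out = normalize_kennel_name_alt kennel_name
instance (kennel_name : String) (out : String) : Decidable (Spec_normalize_kennel_name kennel_name out) := by unfold Spec_normalize_kennel_name; infer_instance

-- ===== CLAIM (what is proved, stated in full; the proofs are below) =====
def Claim_equal_normalize_kennel_name : Prop := ∀ (kennel_name : String), Dom_normalize_kennel_name kennel_name → Spec_normalize_kennel_name kennel_name (normalize_kennel_name kennel_name)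

-- ===== LEMMAS AND PROOFS =====

-- Reference recursion: process the list left to right, `p` = the previous character (none at the start);
-- a char is lowercased when the previous char is an apostrophe, it is a letter, and the next char is a space or the end.
def specGo (p : Option Char) : List Char → List Char
  | [] => []
  | c :: rest =>
    (if p = some '\'' ∧ PySem.Chars.isalpha c = true ∧ (rest.head? = some ' ' ∨ rest = []) then
        PySem.Chars.lowerChar c
      else c) :: specGo (some c) rest

lemma charLe_toNat {a b : Char} (h : a ≤ b) : a.toNat ≤ b.toNat := Fin.mk_le_mk.mp h

lemma isalpha_ne_apos {c : Char} (h : PySem.Chars.isalpha c = true) :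
    c ≠ '\'' ∧ PySem.Chars.lowerChar c ≠ '\'' := by
  simp only [PySem.Chars.isalpha, PySem.Chars.isupper, PySem.Chars.islower, Bool.or_eq_true,
    Bool.and_eq_true, decide_eq_true_eq] at h
  have h' : (65 ≤ c.toNat ∧ c.toNat ≤ 90) ∨ (97 ≤ c.toNat ∧ c.toNat ≤ 122) := by
    rcases h with ⟨h1, h2⟩ | ⟨h1, h2⟩ <;> [left; right] <;>
      exact ⟨charLe_toNat h1, charLe_toNat h2⟩
  have hne : c.toNat ≠ 39 := by omega
  refine ⟨fun he => hne (by rw [he]; rfl), ?_⟩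
  simp only [PySem.Chars.lowerChar, PySem.Chars.isupper, Bool.and_eq_true, decide_eq_true_eq]
  split_ifs with hu
  · intro he
    have hx : (Char.ofNat (c.toNat + 32)).toNat = 39 := by rw [he]; rfl
    rw [Char.toNat_ofNat] at hx
    have hv : (c.toNat + 32).isValidChar := Or.inl (by omega)
    simp [hv] at hx; omega
  · exact fun he => hne (by rw [he]; rfl)

lemma specGo_congr {p q : Option Char} (h : (p = some '\'') ↔ (q = some '\'')) (xs : List Char) :
    specGo p xs = specGo q xs := by
  cases xs with
  | nil => rfl
  | cons c rest => simp only [specGo, h]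

-- ---- A's loop equals specGo ----
lemma foldA (m : Nat) : ∀ (l : List Char) (k : Nat), 1 ≤ k → k + m = l.length →
    (PySem.List.pyRange (k : Int) (l.length : Int)).foldl stepA l
      = l.take k ++ specGo l[k-1]? (l.drop k) := by
  induction m with
  | zero =>
    intro l k hk hlen
    have hkl : k = l.length := by omega
    subst hkl
    simp [PySem.List.pyRange, List.drop_length, specGo]
  | succ m ih =>
    intro l k hk hlen
    have hklt : k < l.length := by omega
    have hk1 : k - 1 < l.length := by omega
    rw [PySem.List.pyRange_one_cons (by exact_mod_cast hklt), List.foldl_cons]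
    have hstep : stepA l (k : Int)
        = if l[k - 1] = '\'' ∧ PySem.Chars.isalpha l[k] = true ∧ (l[k+1]? = some ' ' ∨ l[k+1]? = none)
          then l.set k (PySem.Chars.lowerChar l[k]) else l := by
      unfold stepA
      have e1 : ((k : Int) - 1) = ((k - 1 : Nat) : Int) := by omega
      have e2 : ((k : Int) + 1) = ((k + 1 : Nat) : Int) := by omega
      rw [e1, e2, PySem.List.pyGetD_natCast, PySem.List.pyGetD_natCast]
      have eprev : l.getD (k - 1) ' ' = l[k - 1] := List.getD_eq_getElem l ' ' hk1
      have ecur : l.getD k ' ' = l[k] := List.getD_eq_getElem l ' ' hklt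
      have enext : (if ((k + 1 : Nat) : Int) < (l.length : Int)
          then PySem.List.pyGet? l ((k + 1 : Nat) : Int) else none) = l[k+1]? := by
        split_ifs with hlt
        · rw [PySem.List.pyGet?_natCast]
        · rw [eq_comm, List.getElem?_eq_none_iff]
          omega
      rw [eprev, ecur, enext, Int.toNat_natCast]
    rw [hstep]
    have hdropk : l.drop k = l[k] :: l.drop (k + 1) := List.drop_eq_getElem_cons hklt
    have hspec : specGo l[k-1]? (l.drop k)
        = (if l[k - 1] = '\'' ∧ PySem.Chars.isalpha l[k] = true ∧ (l[k+1]? = some ' ' ∨ l[k+1]? = none)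
            then PySem.Chars.lowerChar l[k] else l[k]) :: specGo (some l[k]) (l.drop (k + 1)) := by
      rw [hdropk]
      simp only [specGo, List.getElem?_eq_getElem hk1, Option.some.injEq, List.head?_drop,
        List.drop_eq_nil_iff, ← List.getElem?_eq_none_iff (l := l) (i := k + 1)]
    split_ifs with hC
    · have hset : (l.set k (PySem.Chars.lowerChar l[k])).length = l.length := by simp
      have hIH := ih (l.set k (PySem.Chars.lowerChar l[k])) (k + 1) (by omega) (by simp; omega)
      rw [hset] at hIH
      rw [show ((k : Int) + 1) = ((k + 1 : Nat) : Int) by omega, hIH, hspec]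
      have htake : (l.set k (PySem.Chars.lowerChar l[k])).take (k + 1)
          = l.take k ++ [PySem.Chars.lowerChar l[k]] := by
        rw [List.take_add_one, List.take_set, List.set_eq_of_length_le (by simp),
          List.getElem?_set_self (by omega)]
        rfl
      have hget : (l.set k (PySem.Chars.lowerChar l[k]))[(k+1) - 1]? = some (PySem.Chars.lowerChar l[k]) := by
        simp only [Nat.add_sub_cancel]
        exact List.getElem?_set_self (by omega)
      have hdrop : (l.set k (PySem.Chars.lowerChar l[k])).drop (k + 1) = l.drop (k + 1) := by
        simp [List.drop_set]
      rw [htake, hget, hdrop, if_pos hC]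
      have halpha := isalpha_ne_apos hC.2.1
      rw [specGo_congr (p := some (PySem.Chars.lowerChar l[k])) (q := some l[k])
        (by simp [halpha.1, halpha.2])]
      simp
    · have hIH := ih l (k + 1) (by omega) (by omega)
      have htk : List.take (k + 1) l = List.take k l ++ [l[k]] := by
        rw [List.take_add_one, List.getElem?_eq_getElem hklt]
        rfl
      have hg : l[k + 1 - 1]? = some l[k] := by
        simp only [Nat.add_sub_cancel]
        exact List.getElem?_eq_getElem hklt
      rw [hg, htk] at hIH
      rw [show ((k : Int) + 1) = ((k + 1 : Nat) : Int) by omega, hIH, hspec, if_neg hC]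
      simp only [List.append_assoc, List.singleton_append]

lemma A_eq_spec (cs : List Char) :
    (PySem.List.pyRange 1 (cs.length : Int)).foldl stepA cs = specGo none cs := by
  cases cs with
  | nil => simp [PySem.List.pyRange, specGo]
  | cons c rest =>
    have h := foldA rest.length (c :: rest) 1 le_rfl (by simp [Nat.add_comm])
    rw [show ((1 : Nat) : Int) = (1 : Int) from rfl] at h
    rw [h]
    show [c] ++ specGo (some c) rest = specGo none (c :: rest)
    simp [specGo]

-- ---- B equals specGo ----

-- previous char of the last char of `w`, where `p` precedes `w`
def prevOf (p : Option Char) (w : List Char) : Option Char :=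
  if 2 ≤ w.length then w[w.length - 2]? else p

-- prev-aware word fix; for p not an apostrophe it coincides with fixWord
def fixp (p : Option Char) (w : List Char) : List Char :=
  match w.getLast? with
  | none => w
  | some c =>
    if prevOf p w = some '\'' ∧ PySem.Chars.isalpha c = true then
      w.dropLast ++ [PySem.Chars.lowerChar c]
    else w

lemma fixWord_eq_fixp {p : Option Char} (hp : p ≠ some '\'') (w : List Char) :
    fixWord w = fixp p w := by
  by_cases h2 : 2 ≤ w.length
  · have hlt1 : w.length - 1 < w.length := by omega
    have hlt2 : w.length - 2 < w.length := by omega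
    have hg1 : PySem.List.pyGetD w (-1) ' ' = w[w.length - 1] := by
      simp [PySem.List.pyGetD, PySem.List.pyGet?, PySem.List.pyIdx?,
        show -(w.length : Int) ≤ -1 by omega, List.getElem?_eq_getElem hlt1]
    have hg2 : PySem.List.pyGetD w (-2) ' ' = w[w.length - 2] := by
      simp [PySem.List.pyGetD, PySem.List.pyGet?, PySem.List.pyIdx?, h2,
        List.getElem?_eq_getElem hlt2]
    have hlast : w.getLast? = some w[w.length - 1] := by
      rw [List.getLast?_eq_getElem?, List.getElem?_eq_getElem hlt1]
    have hprev : prevOf p w = some w[w.length - 2] := by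
      rw [prevOf, if_pos h2, List.getElem?_eq_getElem hlt2]
    unfold fixWord fixp
    rw [hlast]
    simp only [hg1, hg2, hprev, PySem.List.slice_to_neg_one, h2, true_and, Option.some.injEq]
  · unfold fixWord fixp
    rw [if_neg (by tauto)]
    have hprev : prevOf p w = p := by rw [prevOf, if_neg h2]
    cases hL : w.getLast? with
    | none => rfl
    | some d => simp only [hprev]; rw [if_neg (by tauto)]

lemma fixp_cons (p : Option Char) (c : Char) {w : List Char} (hw : w ≠ []) :
    fixp p (c :: w) = c :: fixp (some c) w := by
  obtain ⟨b, l, rfl⟩ := List.exists_cons_of_ne_nil hw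
  have h2 : (c :: b :: l).getLast? = (b :: l).getLast? := List.getLast?_cons_cons ..
  have hp : prevOf p (c :: b :: l) = prevOf (some c) (b :: l) := by
    simp only [prevOf, List.length_cons]
    rcases l with _ | ⟨e, l'⟩
    · simp
    · have hlen : e :: l' ≠ [] := by simp
      simp only [List.length_cons]
      rw [if_pos (by omega), if_pos (by omega)]
      have h3 : l'.length + 1 + 1 + 1 - 2 = l'.length + 1 := by omega
      have h4 : l'.length + 1 + 1 - 2 = l'.length := by omega
      rw [h3, h4, List.getElem?_cons_succ]
  unfold fixp
  rw [h2, hp]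
  cases (b :: l).getLast? with
  | none => rfl
  | some d =>
    simp only []
    split_ifs with hc
    · simp [List.dropLast_cons_of_ne_nil (l := b :: l) (by simp)]
    · rfl

lemma specGo_word {w : List Char} (hw : ' ' ∉ w) : ∀ p, specGo p w = fixp p w := by
  induction w with
  | nil => intro p; rfl
  | cons c w' ih =>
    intro p
    have hc : c ≠ ' ' := fun h => hw (h ▸ List.mem_cons_self ..)
    have hw' : ' ' ∉ w' := fun h => hw (List.mem_cons_of_mem _ h)
    cases w' with
    | nil =>
      simp only [specGo, fixp, prevOf]
      simp [List.getLast?_singleton]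
      split_ifs <;> rfl
    | cons b l =>
      have hb : b ≠ ' ' := fun h => hw' (h ▸ List.mem_cons_self ..)
      rw [fixp_cons p c (by simp)]
      simp only [specGo]
      rw [if_neg (by simp [hb]), ← ih hw' (some c)]
      rfl

lemma specGo_word_sep {w : List Char} (hw : ' ' ∉ w) (rest : List Char) :
    ∀ p, specGo p (w ++ ' ' :: rest) = fixp p w ++ ' ' :: specGo (some ' ') rest := by
  induction w with
  | nil =>
    intro p
    have ha : PySem.Chars.isalpha ' ' = false := by decide
    simp only [List.nil_append, specGo, fixp]
    rw [if_neg (by simp [ha])]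
    rfl
  | cons c w' ih =>
    intro p
    have hc : c ≠ ' ' := fun h => hw (h ▸ List.mem_cons_self ..)
    have hw' : ' ' ∉ w' := fun h => hw (List.mem_cons_of_mem _ h)
    cases w' with
    | nil =>
      have ha : PySem.Chars.isalpha ' ' = false := by decide
      simp only [List.cons_append, List.nil_append, specGo, fixp, prevOf, List.getLast?_singleton,
        List.head?_cons, ha, Bool.false_eq_true, false_and, and_false, if_false]
      split_ifs with h1 h2 h3 <;> simp_all
    | cons b l =>
      have hb : b ≠ ' ' := fun h => hw' (h ▸ List.mem_cons_self ..)
      have hih := ih hw' (some c)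
      simp only [List.cons_append] at hih ⊢
      rw [fixp_cons p c (by simp)]
      rw [specGo]
      rw [if_neg (by simp [hb]), hih]
      simp

-- PySem's splitOn on a one-char separator is Lean's List.splitOn
lemma splitOn_go_space (fuel : Nat) : ∀ (l cur : List Char) (acc : List (List Char)),
    l.length ≤ fuel →
    PySem.Chars.splitOn.go [' '] fuel l cur acc
      = acc.reverse ++ (l.splitOn ' ').modifyHead (cur.reverse ++ ·) := by
  induction fuel with
  | zero =>
    intro l cur acc hl
    have : l = [] := List.length_eq_zero_iff.mp (Nat.le_zero.mp hl)
    subst this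
    simp [PySem.Chars.splitOn.go, List.splitOn_nil]
  | succ f ih =>
    intro l cur acc hl
    cases l with
    | nil => simp [PySem.Chars.splitOn.go, List.splitOn_nil]
    | cons c rest =>
      simp only [List.length_cons] at hl
      by_cases hc : c = ' '
      · subst hc
        have hpre : List.isPrefixOf [' '] (' ' :: rest) = true := by simp [List.isPrefixOf]
        simp only [PySem.Chars.splitOn.go, hpre, if_true, List.length_cons]
        rw [ih _ _ _ (by simpa using Nat.le_of_succ_le_succ hl)]
        simp [List.splitOn, List.splitOnP_cons]
        cases h : rest.splitOnP (· == ' ') with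
        | nil => exact absurd h (List.splitOnP_ne_nil _ _)
        | cons a t => simp
      · have hpre : List.isPrefixOf [' '] (c :: rest) = false := by
          simp [List.isPrefixOf]; exact fun h => hc h.symm
        simp only [PySem.Chars.splitOn.go, hpre]
        rw [ih _ _ _ (Nat.le_of_succ_le_succ hl)]
        simp only [List.splitOn, List.splitOnP_cons, show (c == ' ') = false by simp [hc]]
        cases h : rest.splitOnP (· == ' ') with
        | nil => exact absurd h (List.splitOnP_ne_nil _ _)
        | cons a t => simp

lemma splitOn_eq (cs : List Char) : PySem.Chars.splitOn cs [' '] = cs.splitOn ' ' := by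
  unfold PySem.Chars.splitOn
  rw [splitOn_go_space (cs.length + 1) cs [] [] (by omega)]
  cases h : cs.splitOn ' ' with
  | nil => exact absurd h (by simp [List.splitOn]; exact List.splitOnP_ne_nil _ _)
  | cons a t => simp

lemma splitOn_no_sep {cs : List Char} (h : ' ' ∉ cs) : cs.splitOn ' ' = [cs] := by
  induction cs with
  | nil => simp [List.splitOn_nil]
  | cons c rest ih =>
    have hc : c ≠ ' ' := fun hh => h (hh ▸ List.mem_cons_self ..)
    have hr : ' ' ∉ rest := fun hh => h (List.mem_cons_of_mem _ hh)
    simp only [List.splitOn, List.splitOnP_cons, show (c == ' ') = false by simp [hc]]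
    simp only [List.splitOn] at ih
    rw [ih hr]
    rfl

lemma splitOn_word {w : List Char} (hw : ' ' ∉ w) (rest : List Char) :
    (w ++ ' ' :: rest).splitOn ' ' = w :: rest.splitOn ' ' := by
  induction w with
  | nil => simp [List.splitOn, List.splitOnP_cons]
  | cons c w' ih =>
    have hc : c ≠ ' ' := fun hh => hw (hh ▸ List.mem_cons_self ..)
    have hw' : ' ' ∉ w' := fun hh => hw (List.mem_cons_of_mem _ hh)
    simp only [List.cons_append, List.splitOn, List.splitOnP_cons,
      show (c == ' ') = false by simp [hc]]
    simp only [List.splitOn] at ih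
    rw [ih hw']
    rfl

lemma B_eq_spec_aux (n : Nat) : ∀ (cs : List Char) (p : Option Char), cs.length ≤ n → p ≠ some '\'' →
    PySem.Chars.join [' '] ((cs.splitOn ' ').map fixWord) = specGo p cs := by
  induction n with
  | zero =>
    intro cs p hl _
    have : cs = [] := List.length_eq_zero_iff.mp (Nat.le_zero.mp hl)
    subst this
    rw [splitOn_no_sep (List.not_mem_nil)]
    simp [PySem.Chars.join_singleton, fixWord, specGo]
  | succ m ih =>
    intro cs p hl hp
    by_cases hmem : ' ' ∈ cs
    · obtain ⟨w, rest, hw, hsplit⟩ :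
          ∃ w rest, ' ' ∉ w ∧ cs = w ++ ' ' :: rest := by
        refine ⟨cs.takeWhile (· ≠ ' '), (cs.dropWhile (· ≠ ' ')).tail, ?_, ?_⟩
        · intro h
          have := List.mem_takeWhile_imp h
          simp at this
        · have hne : cs.dropWhile (· ≠ ' ') ≠ [] := by
            simp only [ne_eq, List.dropWhile_eq_nil_iff, not_forall]
            exact ⟨' ', hmem, by simp⟩
          have hhead : (cs.dropWhile (· ≠ ' ')).head hne = ' ' := by
            have := List.head_dropWhile_not (p := fun c => decide (c ≠ ' ')) hne
            simpa using this
          conv_lhs => rw [← List.takeWhile_append_dropWhile (p := (· ≠ ' ')) (l := cs)]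
          rw [← List.cons_head_tail hne, hhead]
          simp
      subst hsplit
      have hlen : rest.length ≤ m := by
        have := List.length_append (as := w) (bs := ' ' :: rest)
        simp only [List.length_cons] at this
        omega
      rw [splitOn_word hw, List.map_cons]
      have hne2 : (rest.splitOn ' ').map fixWord ≠ [] := by
        simp only [ne_eq, List.map_eq_nil_iff]
        simp [List.splitOn]
        exact List.splitOnP_ne_nil _ _
      obtain ⟨a, t, hat⟩ := List.exists_cons_of_ne_nil hne2
      rw [hat, PySem.Chars.join_cons_cons, ← hat, ih rest (some ' ') hlen (by simp)]
      rw [specGo_word_sep hw rest p, fixWord_eq_fixp hp]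
      simp
    · rw [splitOn_no_sep hmem]
      simp only [List.map_cons, List.map_nil, PySem.Chars.join_singleton]
      rw [fixWord_eq_fixp hp, specGo_word hmem p]

-- ===== VERDICT (by name: the statement is the Claim_ definition above) =====
theorem normalize_kennel_name_spec : Claim_equal_normalize_kennel_name := by
  intro s _
  unfold Spec_normalize_kennel_name normalize_kennel_name normalize_kennel_name_alt
  dsimp only
  rw [A_eq_spec, splitOn_eq,
    B_eq_spec_aux (pyTitle s.toList).length (pyTitle s.toList) none le_rfl (by simp)]
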